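-- pv_equiv track=rewrite | github.com/posl/comment_recommendation_v2 | script/mod_gen/4_time/en/31/0.py | getMaxRepetitions
-- ===== SOURCE A (Python) =====
-- def getMaxRepetitions(s1: str, n1: int, s2: str, n2: int) -> int:
--     # s1 = s1 * n1
--     # s2 = s2 * n2
--     # i = 0
--     # j = 0
--     # count = 0
--     # while i < len(s1):
--     #     if s1[i] == s2[j]:
--     #         i += 1
--     #         j += 1
--     #     else:
--     #         i += 1
--     #     if j == len(s2):
--     #         j = 0
--     #         count += 1
--     # return count
--     s1 = s1 * n1
--     s2 = s2 * n2
--     i = 0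
--     j = 0
--     count = 0
--     while i < len(s1):
--         if s1[i] == s2[j]:
--             i += 1
--             j += 1
--         else:
--             i += 1
--         if j == len(s2):
--             j = 0
--             count += 1
--     return count
-- ===== SOURCE B (Python) =====
-- def getMaxRepetitions(s1: str, n1: int, s2: str, n2: int) -> int:
--     # Per-block memoization (LeetCode 466 style): for each start position in s2,
--     # one pass over s1 yields (completed s2 copies, next position); iterate blocks.
--     if n1 <= 0 or not s1:
--         return 0
--     len2 = len(s2)
--     memo = {}
--     m = 0
--     r = 0
--     for _ in range(n1):
--         if r not in memo:
--             j = r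
--             cnt = 0
--             for c in s1:
--                 if c == s2[j]:
--                     j += 1
--                     if j == len2:
--                         j = 0
--                         cnt += 1
--             memo[r] = (cnt, j)
--         cnt, r = memo[r]
--         m += cnt
--     return m // n2
-- ===== Notes on version B (the rewrite author's own statement) =====
-- stated objective: faster
-- what changed: A scans the full concatenation s1*n1 character by character; B runs one memoized pass of s1 per distinct s2-start-state (at most |s2| passes), iterates n1 blocks in O(1) each via the memo table, and divides the completed-s2 count by n2.
import Mathlib
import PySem

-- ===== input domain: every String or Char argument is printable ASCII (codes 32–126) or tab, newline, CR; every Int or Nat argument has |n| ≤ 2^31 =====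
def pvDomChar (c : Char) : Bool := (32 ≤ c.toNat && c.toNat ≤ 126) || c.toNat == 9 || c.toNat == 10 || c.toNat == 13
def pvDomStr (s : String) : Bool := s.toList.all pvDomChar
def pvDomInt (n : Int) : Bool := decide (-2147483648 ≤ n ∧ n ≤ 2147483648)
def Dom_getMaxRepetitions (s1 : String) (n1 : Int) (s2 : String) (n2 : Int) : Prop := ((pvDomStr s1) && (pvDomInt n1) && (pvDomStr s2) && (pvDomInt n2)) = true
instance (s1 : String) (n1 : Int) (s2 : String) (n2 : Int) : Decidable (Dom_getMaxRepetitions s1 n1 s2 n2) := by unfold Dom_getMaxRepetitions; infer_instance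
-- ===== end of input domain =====

-- B replaces A's single scan of s1*n1 by a memoized per-block automaton over at most |s2|
-- distinct start states plus an O(1)-per-block loop, then divides the s2-count by n2 (LeetCode 466 style).

-- ===== PORT A =====
-- one iteration of A's while-loop body, acting on the state (j, count); i walks the chars of s1*n1
def pvAStep (l2 : List Char) (st : Nat × Int) (c : Char) : Nat × Int :=
  let j := if PySem.List.pyGet? l2 (st.1 : Int) = some c then st.1 + 1 else st.1
  if j = l2.length then (0, st.2 + 1) else (j, st.2)

def getMaxRepetitions (s1 : String) (n1 : Int) (s2 : String) (n2 : Int) : Int :=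
  ((PySem.List.pyRepeat s1.toList n1).foldl
    (pvAStep (PySem.List.pyRepeat s2.toList n2)) (0, 0)).2

-- ===== PORT B =====
-- body of B's inner 'for c in s1' loop, acting on (j, cnt)
def pvBStep (s2l : List Char) (st : Nat × Int) (c : Char) : Nat × Int :=
  if PySem.List.pyGet? s2l (st.1 : Int) = some c then
    if st.1 + 1 = s2l.length then (0, st.2 + 1) else (st.1 + 1, st.2)
  else st

-- one pass of s1 from start state r: (completed s2 copies, end state)
def pvBlockRun (s1l s2l : List Char) (r : Nat) : Int × Nat :=
  ((s1l.foldl (pvBStep s2l) (r, 0)).2, (s1l.foldl (pvBStep s2l) (r, 0)).1)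

-- B's 'for _ in range(n1)' loop with the memo dict
def pvBLoop (s1l s2l : List Char) : Nat → PySem.Dict Nat (Int × Nat) → Int → Nat → Int
  | 0, _, m, _ => m
  | n+1, memo, m, r =>
    match memo.get? r with
    | some v => pvBLoop s1l s2l n memo (m + v.1) v.2
    | none =>
      pvBLoop s1l s2l n (memo.insert r (pvBlockRun s1l s2l r))
        (m + (pvBlockRun s1l s2l r).1) (pvBlockRun s1l s2l r).2

def getMaxRepetitions_alt (s1 : String) (n1 : Int) (s2 : String) (n2 : Int) : Int :=
  if n1 ≤ 0 ∨ s1.toList = [] then 0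
  else PySem.Int.floordiv (pvBLoop s1.toList s2.toList n1.toNat PySem.Dict.empty 0 0) n2

-- ===== PRECONDITION & SPEC =====
-- Pre_ excludes exactly the inputs where A raises IndexError: s2*n2 empty (s2 = "" or n2 ≤ 0)
-- while s1*n1 is nonempty, so A reads s2[0] of an empty string.
def Pre_getMaxRepetitions (s1 : String) (n1 : Int) (s2 : String) (n2 : Int) : Prop :=
  (s2.toList ≠ [] ∧ 1 ≤ n2) ∨ s1.toList = [] ∨ n1 ≤ 0
instance (s1 : String) (n1 : Int) (s2 : String) (n2 : Int) : Decidable (Pre_getMaxRepetitions s1 n1 s2 n2) := by unfold Pre_getMaxRepetitions; infer_instance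
def pvWitness_getMaxRepetitions : String × Int × String × Int := ("abab", 3, "ab", 2)

def Spec_getMaxRepetitions (s1 : String) (n1 : Int) (s2 : String) (n2 : Int) (out : Int) : Prop := out = getMaxRepetitions_alt s1 n1 s2 n2
instance (s1 : String) (n1 : Int) (s2 : String) (n2 : Int) (out : Int) : Decidable (Spec_getMaxRepetitions s1 n1 s2 n2 out) := by unfold Spec_getMaxRepetitions; infer_instance

-- ===== CLAIM (what is proved, stated in full; the proofs are below) =====
def Claim_equal_getMaxRepetitions : Prop := ∀ (s1 : String) (n1 : Int) (s2 : String) (n2 : Int), Dom_getMaxRepetitions s1 n1 s2 n2 → Pre_getMaxRepetitions s1 n1 s2 n2 → Spec_getMaxRepetitions s1 n1 s2 n2 (getMaxRepetitions s1 n1 s2 n2)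

-- ===== LEMMAS AND PROOFS =====

-- abstract model: T = total number of s2-characters matched so far; one input char moves T
def pvT (s2l : List Char) (T : Nat) (c : Char) : Nat :=
  if s2l[T % s2l.length]? = some c then T + 1 else T

-- n blocks of s1 in the abstract model
def pvFPow (s1l s2l : List Char) : Nat → Nat → Nat
  | 0, T => T
  | n+1, T => pvFPow s1l s2l n (s1l.foldl (pvT s2l) T)

-- B's block loop with the memoization stripped out
def pvPure (s1l s2l : List Char) : Nat → Int → Nat → Int
  | 0, m, _ => m
  | n+1, m, r => pvPure s1l s2l n (m + (pvBlockRun s1l s2l r).1) (pvBlockRun s1l s2l r).2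

lemma pvRepeat_eq (xs : List Char) (n : Int) :
    PySem.List.pyRepeat xs n = (List.replicate n.toNat xs).flatten := by
  simp [PySem.List.pyRepeat]

lemma pvRepGet (l : List Char) (n i : Nat) (h : i < n * l.length) :
    ((List.replicate n l).flatten)[i]? = l[i % l.length]? := by
  induction n generalizing i with
  | zero => omega
  | succ n ih =>
    have hl : 0 < l.length := by by_contra h0; simp at h0; simp [h0] at h
    rw [List.replicate_succ, List.flatten_cons]
    by_cases hi : i < l.length
    · rw [List.getElem?_append_left hi, Nat.mod_eq_of_lt hi]
    · have hge : l.length ≤ i := by omega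
      have hmul : (n+1) * l.length = n * l.length + l.length := by ring
      rw [List.getElem?_append_right hge, ih _ (by omega), ← Nat.mod_eq_sub_mod hge]

lemma pvStepMod_mod (M T : Nat) (hM : 0 < M) :
    (T+1) % M = if T % M + 1 = M then 0 else T % M + 1 := by
  have hd := Nat.div_add_mod T M
  have hr : T % M < M := Nat.mod_lt _ hM
  by_cases h : T % M + 1 = M
  · have hmm : (T / M + 1) * M = M * (T / M) + M := by ring
    have h1 : T + 1 = (T / M + 1) * M := by omega
    rw [if_pos h, h1, Nat.mul_mod_left]
  · have h1 : T + 1 = M * (T / M) + (T % M + 1) := by omega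
    rw [if_neg h, h1, Nat.mul_add_mod, Nat.mod_eq_of_lt (by omega)]

lemma pvStepMod_div (M T : Nat) (hM : 0 < M) :
    (T+1) / M = if T % M + 1 = M then T / M + 1 else T / M := by
  have hd := Nat.div_add_mod T M
  have hr : T % M < M := Nat.mod_lt _ hM
  by_cases h : T % M + 1 = M
  · have hmm : (T / M + 1) * M = M * (T / M) + M := by ring
    have h1 : T + 1 = (T / M + 1) * M := by omega
    rw [if_pos h, h1, Nat.mul_div_cancel _ hM]
  · have h1 : T + 1 = M * (T / M) + (T % M + 1) := by omega
    rw [if_neg h, h1, Nat.mul_add_div hM,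
      Nat.div_eq_of_lt (show T % M + 1 < M by omega), Nat.add_zero]

lemma pvLenFlatRep (s2l : List Char) (n : Nat) :
    ((List.replicate n s2l).flatten).length = n * s2l.length := by
  simp [List.length_flatten]

-- A's loop over any chunk of input, abstracted to T (j = T mod L2, added count = ΔT div L2)
lemma pvAFold (s1c s2l : List Char) (n2t : Nat) (h2 : s2l ≠ []) (hn : 0 < n2t)
    (T : Nat) (k : Int) :
    s1c.foldl (pvAStep ((List.replicate n2t s2l).flatten))
        (T % (n2t * s2l.length), k) =
      ((s1c.foldl (pvT s2l) T) % (n2t * s2l.length),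
        k + ((s1c.foldl (pvT s2l) T) / (n2t * s2l.length) : Nat)
          - (T / (n2t * s2l.length) : Nat)) := by
  have hlen : 0 < s2l.length := List.length_pos_of_ne_nil h2
  have hM : 0 < n2t * s2l.length := by positivity
  induction s1c generalizing T k with
  | nil => simp
  | cons c cs ih =>
    rw [List.foldl_cons, List.foldl_cons]
    have hcond : PySem.List.pyGet? ((List.replicate n2t s2l).flatten)
        ((T % (n2t * s2l.length) : Nat) : Int) = s2l[T % s2l.length]? := by
      rw [PySem.List.pyGet?_natCast, pvRepGet _ _ _ (Nat.mod_lt _ hM),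
        Nat.mod_mod_of_dvd T (dvd_mul_left s2l.length n2t)]
    by_cases hc : s2l[T % s2l.length]? = some c
    · have hT : pvT s2l T c = T + 1 := by simp [pvT, hc]
      have hstep : pvAStep ((List.replicate n2t s2l).flatten)
          (T % (n2t * s2l.length), k) c =
          ((T+1) % (n2t * s2l.length),
            k + (((T+1) / (n2t * s2l.length) : Nat) : Int) - ((T / (n2t * s2l.length) : Nat) : Int)) := by
        unfold pvAStep
        rw [hcond, if_pos hc, pvLenFlatRep,
          pvStepMod_mod _ _ hM, pvStepMod_div _ _ hM]
        by_cases hj : T % (n2t * s2l.length) + 1 = n2t * s2l.length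
        · rw [if_pos hj, if_pos hj, if_pos hj]
          simp only [Prod.mk.injEq, true_and]
          push_cast; ring
        · rw [if_neg hj, if_neg hj, if_neg hj]
          simp only [Prod.mk.injEq, true_and]
          push_cast; ring
      rw [hstep, hT, ih (T+1) _]
      simp only [Prod.mk.injEq, true_and]
      ring
    · have hT : pvT s2l T c = T := by simp [pvT, hc]
      have hstep : pvAStep ((List.replicate n2t s2l).flatten)
          (T % (n2t * s2l.length), k) c = (T % (n2t * s2l.length), k) := by
        unfold pvAStep
        rw [hcond, if_neg hc, pvLenFlatRep]
        rw [if_neg (Nat.ne_of_lt (Nat.mod_lt _ hM))]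
      rw [hstep, hT, ih T k]

-- B's inner loop over any chunk of input, abstracted the same way (j = T mod len2)
lemma pvBFold (s1c s2l : List Char) (h2 : s2l ≠ []) (T : Nat) (k : Int) :
    s1c.foldl (pvBStep s2l) (T % s2l.length, k) =
      ((s1c.foldl (pvT s2l) T) % s2l.length,
        k + ((s1c.foldl (pvT s2l) T) / s2l.length : Nat) - (T / s2l.length : Nat)) := by
  have hlen : 0 < s2l.length := List.length_pos_of_ne_nil h2
  induction s1c generalizing T k with
  | nil => simp
  | cons c cs ih =>
    rw [List.foldl_cons, List.foldl_cons]
    by_cases hc : s2l[T % s2l.length]? = some c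
    · have hT : pvT s2l T c = T + 1 := by simp [pvT, hc]
      have hstep : pvBStep s2l (T % s2l.length, k) c =
          ((T+1) % s2l.length,
            k + (((T+1) / s2l.length : Nat) : Int) - ((T / s2l.length : Nat) : Int)) := by
        unfold pvBStep
        rw [PySem.List.pyGet?_natCast, if_pos hc,
          pvStepMod_mod _ _ hlen, pvStepMod_div _ _ hlen]
        by_cases hj : T % s2l.length + 1 = s2l.length
        · rw [if_pos hj, if_pos hj, if_pos hj]
          simp only [Prod.mk.injEq, true_and]
          push_cast; ring
        · rw [if_neg hj, if_neg hj, if_neg hj]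
          simp only [Prod.mk.injEq, true_and]
          push_cast; ring
      rw [hstep, hT, ih (T+1) _]
      simp only [Prod.mk.injEq, true_and]
      ring
    · have hT : pvT s2l T c = T := by simp [pvT, hc]
      have hstep : pvBStep s2l (T % s2l.length, k) c = (T % s2l.length, k) := by
        unfold pvBStep
        rw [PySem.List.pyGet?_natCast, if_neg hc]
      rw [hstep, hT, ih T k]

lemma pvFlattenFold (s1l s2l : List Char) (n : Nat) (T : Nat) :
    ((List.replicate n s1l).flatten).foldl (pvT s2l) T = pvFPow s1l s2l n T := by
  induction n generalizing T with
  | zero => simp [pvFPow]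
  | succ n ih =>
    rw [List.replicate_succ, List.flatten_cons, List.foldl_append, pvFPow, ih]

-- the memo dict only ever caches correct values, so it can be stripped
lemma pvBLoopEqPure (s1l s2l : List Char) (n : Nat) (memo : PySem.Dict Nat (Int × Nat))
    (m : Int) (r : Nat)
    (hm : ∀ k v, memo.get? k = some v → v = pvBlockRun s1l s2l k) :
    pvBLoop s1l s2l n memo m r = pvPure s1l s2l n m r := by
  induction n generalizing memo m r with
  | zero => rfl
  | succ n ih =>
    rw [pvBLoop, pvPure]
    cases hv : memo.get? r with
    | some v => rw [hm r v hv]; exact ih _ _ _ hm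
    | none =>
      refine ih _ _ _ ?_
      intro k v hkv
      rw [PySem.Dict.get?_insert] at hkv
      split at hkv
      · cases hkv; subst_vars; rfl
      · exact hm k v hkv

lemma pvPureVal (s1l s2l : List Char) (h2 : s2l ≠ []) (n : Nat) (T : Nat) (k : Int) :
    pvPure s1l s2l n k (T % s2l.length) =
      k + ((pvFPow s1l s2l n T) / s2l.length : Nat) - (T / s2l.length : Nat) := by
  induction n generalizing T k with
  | zero => simp [pvPure, pvFPow]
  | succ n ih =>
    have hb : pvBlockRun s1l s2l (T % s2l.length) =
        ((0:Int) + ((s1l.foldl (pvT s2l) T) / s2l.length : Nat) - (T / s2l.length : Nat),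
          (s1l.foldl (pvT s2l) T) % s2l.length) := by
      unfold pvBlockRun
      rw [pvBFold s1l s2l h2 T 0]
    rw [pvPure, pvFPow, hb]
    rw [ih (s1l.foldl (pvT s2l) T) _]
    ring

-- ===== VERDICT (by name: the statement is the Claim_ definition above) =====
theorem getMaxRepetitions_spec : Claim_equal_getMaxRepetitions := by
  intro s1 n1 s2 n2 _ hpre
  unfold Spec_getMaxRepetitions getMaxRepetitions getMaxRepetitions_alt
  by_cases hmain : n1 ≤ 0 ∨ s1.toList = []
  · rw [if_pos hmain]
    have hl1 : PySem.List.pyRepeat s1.toList n1 = [] := by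
      rw [pvRepeat_eq]
      rcases hmain with h | h
      · rw [Int.toNat_of_nonpos h]; simp
      · simp [h]
    rw [hl1]; rfl
  · rw [if_neg hmain]
    have hn1 : ¬ n1 ≤ 0 := fun h => hmain (Or.inl h)
    have hs1 : s1.toList ≠ [] := fun h => hmain (Or.inr h)
    have h2 : s2.toList ≠ [] := by
      rcases hpre with ⟨h2, _⟩ | h | h
      · exact h2
      · exact absurd h hs1
      · omega
    have hn2 : 1 ≤ n2 := by
      rcases hpre with ⟨_, hn2⟩ | h | h
      · exact hn2
      · exact absurd h hs1
      · omega
    have hn2t : 0 < n2.toNat := by omega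
    have hlen : 0 < s2.toList.length := List.length_pos_of_ne_nil h2
    -- A side
    have hA := pvAFold ((List.replicate n1.toNat s1.toList).flatten) s2.toList n2.toNat h2 hn2t 0 0
    simp only [Nat.zero_mod, Nat.zero_div, Nat.cast_zero, sub_zero, zero_add] at hA
    rw [pvFlattenFold] at hA
    -- B side
    have hB := pvBLoopEqPure s1.toList s2.toList n1.toNat PySem.Dict.empty 0 0
      (by intro k v hkv; rw [PySem.Dict.get?_empty] at hkv; cases hkv)
    have hP := pvPureVal s1.toList s2.toList h2 n1.toNat 0 0
    simp only [Nat.zero_mod, Nat.zero_div, Nat.cast_zero, sub_zero, zero_add] at hP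
    have hfd := PySem.Int.floordiv_natCast
      (pvFPow s1.toList s2.toList n1.toNat 0 / s2.toList.length) n2.toNat
    rw [Int.toNat_of_nonneg (by omega : (0:Int) ≤ n2)] at hfd
    rw [pvRepeat_eq s1.toList n1, pvRepeat_eq s2.toList n2, hB, hP, hfd, hA,
      Nat.div_div_eq_div_mul, Nat.mul_comm s2.toList.length n2.toNat]
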